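-- pv_equiv track=rewrite | github.com/athityakumar/btp | approaches/networkx-graph/source_words_with_operations.py | generate_operations_for_a_wordpair
-- ===== SOURCE A (Python) =====
-- def generate_operations_for_a_wordpair(source, dest):
--   operations = list()
--
--   source_length = len(source)
--   dest_length   = len(dest)
--   max_length    = max(source_length, dest_length)
--   for i in range(0, max_length):
--     if i >= source_length:
--       operations.append("insert_"+dest[i]+"_"+str(i-dest_length))
--     elif i >= dest_length:
--       operations.append("delete_"+source[i]+"_"+str(i-source_length))
--     elif not source[i] == dest[i]:
--       operations.append("delete_"+source[i]+"_"+str(i-source_length))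
--       operations.append("insert_"+dest[i]+"_"+str(i-dest_length))
--
--   return(operations)
-- ===== SOURCE B (Python) =====
-- def generate_operations_for_a_wordpair(source, dest):
--     ls, ld = len(source), len(dest)
--     dels = [(i, "delete_" + c + "_" + str(i - ls))
--             for i, c in enumerate(source) if i >= ld or c != dest[i]]
--     inss = [(i, "insert_" + c + "_" + str(i - ld))
--             for i, c in enumerate(dest) if i >= ls or c != source[i]]
--     out = []
--     p = q = 0
--     while p < len(dels) and q < len(inss):
--         if dels[p][0] <= inss[q][0]:
--             out.append(dels[p][1]); p += 1
--         else:
--             out.append(inss[q][1]); q += 1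
--     out.extend(op for _, op in dels[p:])
--     out.extend(op for _, op in inss[q:])
--     return out
-- ===== Notes on version B (the rewrite author's own statement) =====
-- stated objective: alternative
-- what changed: Instead of A's single positional scan that interleaves operations per index, B builds the position-tagged delete stream and insert stream independently and then merges the two position-sorted streams with a two-pointer loop (delete wins ties).
import Mathlib
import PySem

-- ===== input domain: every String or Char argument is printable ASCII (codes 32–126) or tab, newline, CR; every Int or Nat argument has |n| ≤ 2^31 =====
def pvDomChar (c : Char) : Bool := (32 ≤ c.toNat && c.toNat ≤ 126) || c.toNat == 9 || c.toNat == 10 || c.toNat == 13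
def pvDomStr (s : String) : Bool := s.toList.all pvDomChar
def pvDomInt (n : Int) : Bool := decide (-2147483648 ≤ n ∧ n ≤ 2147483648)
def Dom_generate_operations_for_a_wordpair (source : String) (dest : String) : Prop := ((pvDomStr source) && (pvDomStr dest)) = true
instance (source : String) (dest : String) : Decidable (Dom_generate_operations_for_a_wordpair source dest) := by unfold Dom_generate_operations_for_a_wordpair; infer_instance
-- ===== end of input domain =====

-- B replaces A's single positional scan by a different algorithm: it builds the position-tagged
-- delete stream and insert stream independently, then merges the two position-sorted streams
-- with two pointers (delete wins ties); same return value, alternative algorithm, same O(n) cost.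

-- ===== PORT A =====
def generate_operations_for_a_wordpair (source : String) (dest : String) : List String :=
  let s := source.toList
  let d := dest.toList
  let source_length : Int := s.length
  let dest_length : Int := d.length
  let max_length : Int := max source_length dest_length
  (PySem.List.pyRange 0 max_length 1).foldl (fun operations i =>
    if i ≥ source_length then
      operations ++ ["insert_" ++ String.mk [PySem.List.pyGetD d i ' '] ++ "_" ++ PySem.Int.toStr (i - dest_length)]
    else if i ≥ dest_length then
      operations ++ ["delete_" ++ String.mk [PySem.List.pyGetD s i ' '] ++ "_" ++ PySem.Int.toStr (i - source_length)]
    else if ¬ (PySem.List.pyGetD s i ' ' == PySem.List.pyGetD d i ' ') then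
      operations ++ ["delete_" ++ String.mk [PySem.List.pyGetD s i ' '] ++ "_" ++ PySem.Int.toStr (i - source_length),
                     "insert_" ++ String.mk [PySem.List.pyGetD d i ' '] ++ "_" ++ PySem.Int.toStr (i - dest_length)]
    else operations) []

-- ===== PORT B =====
-- port of Source B's two-pointer while loop (pointers p,q into the two streams → recursion on the
-- two remaining suffixes; the fallback row is the two trailing extends)
def mergeTwoPtr : List (Int × String) → List (Int × String) → List String
  | (i, x) :: xs, (j, y) :: ys =>
      if i ≤ j then x :: mergeTwoPtr xs ((j, y) :: ys)
      else y :: mergeTwoPtr ((i, x) :: xs) ys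
  | xs, ys => xs.map Prod.snd ++ ys.map Prod.snd
termination_by xs ys => xs.length + ys.length

def generate_operations_for_a_wordpair_alt (source : String) (dest : String) : List String :=
  let s := source.toList
  let d := dest.toList
  let ls : Int := s.length
  let ld : Int := d.length
  let dels := (PySem.List.enumerate s 0).filterMap (fun x =>
    if x.1 ≥ ld ∨ x.2 ≠ PySem.List.pyGetD d x.1 ' ' then
      some (x.1, "delete_" ++ String.mk [x.2] ++ "_" ++ PySem.Int.toStr (x.1 - ls)) else none)
  let inss := (PySem.List.enumerate d 0).filterMap (fun x =>
    if x.1 ≥ ls ∨ x.2 ≠ PySem.List.pyGetD s x.1 ' ' then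
      some (x.1, "insert_" ++ String.mk [x.2] ++ "_" ++ PySem.Int.toStr (x.1 - ld)) else none)
  mergeTwoPtr dels inss

-- ===== PRECONDITION & SPEC =====
def Spec_generate_operations_for_a_wordpair (source : String) (dest : String) (out : List String) : Prop := out = generate_operations_for_a_wordpair_alt source dest
instance (source : String) (dest : String) (out : List String) : Decidable (Spec_generate_operations_for_a_wordpair source dest out) := by unfold Spec_generate_operations_for_a_wordpair; infer_instance

-- ===== CLAIM (what is proved, stated in full; the proofs are below) =====
def Claim_equal_generate_operations_for_a_wordpair : Prop := ∀ (source : String) (dest : String), Dom_generate_operations_for_a_wordpair source dest → Spec_generate_operations_for_a_wordpair source dest (generate_operations_for_a_wordpair source dest)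

-- ===== LEMMAS AND PROOFS =====

def delStr (a : Char) (n : Int) : String := "delete_" ++ String.mk [a] ++ "_" ++ PySem.Int.toStr n
def insStr (a : Char) (n : Int) : String := "insert_" ++ String.mk [a] ++ "_" ++ PySem.Int.toStr n

lemma delStr_arg (a : Char) {n m : Int} (h : n = m) : delStr a n = delStr a m := by rw [h]
lemma insStr_arg (a : Char) {n m : Int} (h : n = m) : insStr a n = insStr a m := by rw [h]

def goDel : List Char → List String
  | [] => []
  | a :: t => delStr a (-((t.length : Int) + 1)) :: goDel t

def goIns : List Char → List String
  | [] => []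
  | a :: t => insStr a (-((t.length : Int) + 1)) :: goIns t

def zipOps : List Char → List Char → List String
  | a :: s, b :: d =>
      (if ¬ (a == b) then [delStr a (-((s.length : Int) + 1)), insStr b (-((d.length : Int) + 1))] else [])
      ++ zipOps s d
  | _, _ => []

-- the common reference value
def E (s d : List Char) : List String :=
  zipOps s d ++ goDel (s.drop d.length) ++ goIns (d.drop s.length)

-- A's per-index contribution, in Nat form
def fA (s d : List Char) (k : Nat) : List String :=
  if s.length ≤ k then [insStr (d.getD k ' ') ((k : Int) - d.length)]
  else if d.length ≤ k then [delStr (s.getD k ' ') ((k : Int) - s.length)]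
  else if ¬ (s.getD k ' ' == d.getD k ' ') then
    [delStr (s.getD k ' ') ((k : Int) - s.length), insStr (d.getD k ' ') ((k : Int) - d.length)]
  else []

lemma pv_flatMap_congr {α β : Type} {l : List α} {f g : α → List β} (h : ∀ x ∈ l, f x = g x) :
    l.flatMap f = l.flatMap g := by
  induction l with
  | nil => rfl
  | cons a l ih =>
    rw [List.flatMap_cons, List.flatMap_cons, h a (List.mem_cons_self), ih (fun x hx => h x (List.mem_cons_of_mem a hx))]

lemma pv_filterMap_congr {α β : Type} {l : List α} {f g : α → Option β} (h : ∀ x ∈ l, f x = g x) :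
    l.filterMap f = l.filterMap g := by
  induction l with
  | nil => rfl
  | cons a l ih =>
    rw [List.filterMap_cons, List.filterMap_cons, h a (List.mem_cons_self), ih (fun x hx => h x (List.mem_cons_of_mem a hx))]

lemma pv_foldl_ite3 {α β : Type} (l : List α) (c1 c2 c3 : α → Prop) [DecidablePred c1] [DecidablePred c2] [DecidablePred c3]
    (u v w : α → List β) (init : List β) :
    l.foldl (fun acc x => if c1 x then acc ++ u x else if c2 x then acc ++ v x else if c3 x then acc ++ w x else acc) init
      = init ++ l.flatMap (fun x => if c1 x then u x else if c2 x then v x else if c3 x then w x else []) := by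
  have hf : (fun (acc : List β) x => if c1 x then acc ++ u x else if c2 x then acc ++ v x else if c3 x then acc ++ w x else acc)
      = fun acc x => acc ++ (if c1 x then u x else if c2 x then v x else if c3 x then w x else []) := by
    funext acc x; split_ifs <;> simp
  rw [hf, PySem.List.foldl_append_eq_flatMap]

lemma A_eq_flat (source dest : String) :
    generate_operations_for_a_wordpair source dest =
      (List.range (max source.toList.length dest.toList.length)).flatMap (fA source.toList dest.toList) := by
  simp only [generate_operations_for_a_wordpair]
  rw [pv_foldl_ite3, PySem.List.pyRange_one]
  have hN : ((max (source.toList.length : Int) (dest.toList.length : Int)) - 0).toNat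
      = max source.toList.length dest.toList.length := by omega
  rw [hN, List.flatMap_map, List.nil_append]
  apply pv_flatMap_congr
  intro k hk
  simp only [zero_add, fA, ge_iff_le, Nat.cast_le, PySem.List.pyGetD_natCast, delStr, insStr]

lemma delA (t : List Char) :
    (List.range t.length).flatMap (fun k => [delStr (t.getD k ' ') ((k : Int) - t.length)]) = goDel t := by
  induction t with
  | nil => simp [goDel]
  | cons a t ih =>
    simp only [List.length_cons, List.range_succ_eq_map, List.flatMap_cons, List.flatMap_map,
      List.getD_cons_zero, List.getD_cons_succ, List.singleton_append, goDel]
    congr 1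
    rw [← ih]
    apply pv_flatMap_congr; intro k hk
    exact congrArg (fun z => [z]) (delStr_arg _ (by push_cast; ring))

lemma insA (t : List Char) :
    (List.range t.length).flatMap (fun k => [insStr (t.getD k ' ') ((k : Int) - t.length)]) = goIns t := by
  induction t with
  | nil => simp [goIns]
  | cons a t ih =>
    simp only [List.length_cons, List.range_succ_eq_map, List.flatMap_cons, List.flatMap_map,
      List.getD_cons_zero, List.getD_cons_succ, List.singleton_append, goIns]
    congr 1
    rw [← ih]
    apply pv_flatMap_congr; intro k hk
    exact congrArg (fun z => [z]) (insStr_arg _ (by push_cast; ring))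

lemma flat_fA (s d : List Char) :
    (List.range (max s.length d.length)).flatMap (fA s d) = E s d := by
  induction s generalizing d with
  | nil =>
    cases d with
    | nil => simp [E, zipOps, goDel, goIns]
    | cons b d =>
      simp only [List.length_nil, Nat.zero_max, E, zipOps, List.drop_nil, List.drop_zero,
        goDel, List.nil_append]
      rw [← insA (b :: d)]
      apply pv_flatMap_congr; intro k hk
      simp only [fA, List.length_nil]
      rw [if_pos (Nat.zero_le k)]
  | cons a s ih =>
    cases d with
    | nil =>
      simp only [List.length_nil, Nat.max_zero, E, List.drop_nil, List.drop_zero, goIns,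
        List.append_nil]
      have hz : zipOps (a :: s) [] = [] := rfl
      rw [hz, List.nil_append, ← delA (a :: s)]
      apply pv_flatMap_congr; intro k hk
      have hk' : k < (a :: s).length := List.mem_range.mp hk
      simp only [fA, List.length_nil]
      rw [if_neg (by omega), if_pos (Nat.zero_le k)]
    | cons b d =>
      have hmax : max (a :: s).length (b :: d).length = (max s.length d.length) + 1 := by
        simp only [List.length_cons]; omega
      rw [hmax, List.range_succ_eq_map, List.flatMap_cons, List.flatMap_map]
      have hE : E (a :: s) (b :: d) =
          (if ¬ (a == b) then [delStr a (-((s.length : Int) + 1)), insStr b (-((d.length : Int) + 1))] else [])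
            ++ E s d := by
        simp only [E, zipOps, List.length_cons, List.drop_succ_cons, List.append_assoc]
      rw [hE]
      congr 1
      rw [← ih d]
      apply pv_flatMap_congr; intro k hk
      simp only [fA, List.length_cons, Nat.succ_eq_add_one, List.getD_cons_succ,
        Nat.add_le_add_iff_right]
      split_ifs with h1 h2 h3
      · exact congrArg (fun z => [z]) (insStr_arg _ (by push_cast; ring))
      · exact congrArg (fun z => [z]) (delStr_arg _ (by push_cast; ring))
      · rfl
      · rw [delStr_arg _ (show ((k+1 : Nat) : Int) - ((s.length + 1 : Nat) : Int) = (k : Int) - s.length by push_cast; ring),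
           insStr_arg _ (show ((k+1 : Nat) : Int) - ((d.length + 1 : Nat) : Int) = (k : Int) - d.length by push_cast; ring)]

-- B-side reference streams: the delete/insert streams with their positions, recursively
def DD : List Char → List Char → Int → List (Int × String)
  | [], _, _ => []
  | a :: s, [], c => (c, delStr a (-((s.length : Int) + 1))) :: DD s [] (c + 1)
  | a :: s, b :: d, c =>
      (if a = b then [] else [(c, delStr a (-((s.length : Int) + 1)))]) ++ DD s d (c + 1)

def II : List Char → List Char → Int → List (Int × String)
  | _, [], _ => []
  | [], b :: d, c => (c, insStr b (-((d.length : Int) + 1))) :: II [] d (c + 1)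
  | a :: s, b :: d, c =>
      (if a = b then [] else [(c, insStr b (-((d.length : Int) + 1)))]) ++ II s d (c + 1)

lemma DD_ge (s d : List Char) (c : Int) : ∀ x ∈ DD s d c, c ≤ x.1 := by
  induction s generalizing d c with
  | nil => intro x hx; simp [DD] at hx
  | cons a s ih =>
    intro x hx
    cases d with
    | nil =>
      rcases List.mem_cons.mp hx with rfl | hx
      · simp
      · have := ih [] (c + 1) x hx; omega
    | cons b d =>
      rcases List.mem_append.mp hx with hx | hx
      · by_cases hab : a = b
        · simp [DD, hab] at hx
        · simp only [DD, hab, if_false, List.mem_singleton] at hx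
          simp [hx]
      · have := ih d (c + 1) x hx; omega

lemma fm_cons {α β : Type} (f : α → Option β) (x : α) (l : List α) :
    (x :: l).filterMap f = (f x).toList ++ l.filterMap f := by
  rw [List.filterMap_cons]
  cases f x <;> simp

-- the delete stream in Nat-range form equals DD
lemma dels_eq (s d : List Char) (c : Int) :
    (List.range s.length).filterMap (fun k =>
      if d.length ≤ k ∨ s.getD k ' ' ≠ d.getD k ' ' then
        some (c + (k : Int), delStr (s.getD k ' ') ((k : Int) - s.length)) else none)
      = DD s d c := by
  induction s generalizing d c with
  | nil => simp [DD]
  | cons a s ih =>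
    rw [List.length_cons, List.range_succ_eq_map, fm_cons, List.filterMap_map]
    have htail : (List.range s.length).filterMap ((fun k =>
        if d.length ≤ k ∨ (a :: s).getD k ' ' ≠ d.getD k ' ' then
          some (c + (k : Int), delStr ((a :: s).getD k ' ') ((k : Int) - ((s.length + 1 : Nat) : Int))) else none) ∘ Nat.succ)
        = DD s d.tail (c + 1) := by
      rw [← ih d.tail (c + 1)]
      apply pv_filterMap_congr; intro k hk
      have hcond : (d.length ≤ k + 1 ∨ s.getD k ' ' ≠ d.getD (k + 1) ' ')
          ↔ (d.tail.length ≤ k ∨ s.getD k ' ' ≠ d.tail.getD k ' ') := by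
        cases d <;> simp
      simp only [Function.comp, List.getD_cons_succ, Nat.succ_eq_add_one, List.length_cons]
      by_cases h : d.tail.length ≤ k ∨ s.getD k ' ' ≠ d.tail.getD k ' '
      · rw [if_pos (hcond.mpr h), if_pos h]
        simp only [Option.some.injEq, Prod.mk.injEq]
        exact ⟨by push_cast; ring, delStr_arg _ (by push_cast; ring)⟩
      · rw [if_neg (fun hc => h (hcond.mp hc)), if_neg h]
    rw [htail]
    cases d with
    | nil =>
      have h0 : (([] : List Char).length ≤ 0 ∨ (a :: s).getD 0 ' ' ≠ ([] : List Char).getD 0 ' ') :=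
        Or.inl (by simp)
      rw [if_pos h0]
      simp only [Option.toList_some, List.singleton_append, List.tail_nil, List.getD_cons_zero,
        DD, List.cons.injEq, Prod.mk.injEq]
      refine ⟨⟨by push_cast; ring, delStr_arg a (by push_cast; ring)⟩, trivial⟩
    | cons b d =>
      have hcond0 : ((b :: d).length ≤ 0 ∨ (a :: s).getD 0 ' ' ≠ (b :: d).getD 0 ' ') ↔ ¬ (a = b) := by
        simp
      by_cases hab : a = b
      · rw [if_neg (fun hc => (hcond0.mp hc) hab)]
        simp [DD, hab]
      · rw [if_pos (hcond0.mpr hab)]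
        simp only [Option.toList_some, List.singleton_append, List.tail_cons, List.getD_cons_zero,
          DD, hab, if_false, List.cons.injEq, Prod.mk.injEq]
        refine ⟨⟨by push_cast; ring, delStr_arg a (by push_cast; ring)⟩, trivial⟩

-- the insert stream in Nat-range form equals II
lemma inss_eq (s d : List Char) (c : Int) :
    (List.range d.length).filterMap (fun k =>
      if s.length ≤ k ∨ d.getD k ' ' ≠ s.getD k ' ' then
        some (c + (k : Int), insStr (d.getD k ' ') ((k : Int) - d.length)) else none)
      = II s d c := by
  induction d generalizing s c with
  | nil => cases s <;> simp [II]
  | cons b d ih =>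
    rw [List.length_cons, List.range_succ_eq_map, fm_cons, List.filterMap_map]
    have htail : (List.range d.length).filterMap ((fun k =>
        if s.length ≤ k ∨ (b :: d).getD k ' ' ≠ s.getD k ' ' then
          some (c + (k : Int), insStr ((b :: d).getD k ' ') ((k : Int) - ((d.length + 1 : Nat) : Int))) else none) ∘ Nat.succ)
        = II s.tail d (c + 1) := by
      rw [← ih s.tail (c + 1)]
      apply pv_filterMap_congr; intro k hk
      have hcond : (s.length ≤ k + 1 ∨ d.getD k ' ' ≠ s.getD (k + 1) ' ')
          ↔ (s.tail.length ≤ k ∨ d.getD k ' ' ≠ s.tail.getD k ' ') := by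
        cases s <;> simp
      simp only [Function.comp, List.getD_cons_succ, Nat.succ_eq_add_one, List.length_cons]
      by_cases h : s.tail.length ≤ k ∨ d.getD k ' ' ≠ s.tail.getD k ' '
      · rw [if_pos (hcond.mpr h), if_pos h]
        simp only [Option.some.injEq, Prod.mk.injEq]
        exact ⟨by push_cast; ring, insStr_arg _ (by push_cast; ring)⟩
      · rw [if_neg (fun hc => h (hcond.mp hc)), if_neg h]
    rw [htail]
    cases s with
    | nil =>
      have h0 : (([] : List Char).length ≤ 0 ∨ (b :: d).getD 0 ' ' ≠ ([] : List Char).getD 0 ' ') :=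
        Or.inl (by simp)
      rw [if_pos h0]
      simp only [Option.toList_some, List.singleton_append, List.tail_nil, List.getD_cons_zero,
        II, List.cons.injEq, Prod.mk.injEq]
      refine ⟨⟨by push_cast; ring, insStr_arg b (by push_cast; ring)⟩, trivial⟩
    | cons a s =>
      have hcond0 : ((a :: s).length ≤ 0 ∨ (b :: d).getD 0 ' ' ≠ (a :: s).getD 0 ' ') ↔ ¬ (a = b) := by
        simp [eq_comm]
      by_cases hab : a = b
      · rw [if_neg (fun hc => (hcond0.mp hc) hab)]
        simp [II, hab]
      · rw [if_pos (hcond0.mpr hab)]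
        simp only [Option.toList_some, List.singleton_append, List.tail_cons, List.getD_cons_zero,
          II, hab, if_false, List.cons.injEq, Prod.mk.injEq]
        refine ⟨⟨by push_cast; ring, insStr_arg b (by push_cast; ring)⟩, trivial⟩

lemma II_nil_map (d : List Char) (c : Int) : (II [] d c).map Prod.snd = goIns d := by
  induction d generalizing c with
  | nil => rfl
  | cons b d ih => simp only [II, List.map_cons, goIns, ih]

lemma DD_nil_map (s : List Char) (c : Int) : (DD s [] c).map Prod.snd = goDel s := by
  induction s generalizing c with
  | nil => rfl
  | cons a s ih => simp only [DD, List.map_cons, goDel, ih]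

lemma merge_nil_left (ys : List (Int × String)) : mergeTwoPtr [] ys = ys.map Prod.snd := by
  cases ys <;> simp [mergeTwoPtr]

lemma merge_nil_right (xs : List (Int × String)) : mergeTwoPtr xs [] = xs.map Prod.snd := by
  cases xs <;> simp [mergeTwoPtr]

lemma merge_skip (c : Int) (y : String) (xs ys : List (Int × String))
    (h : ∀ x ∈ xs, c < x.1) :
    mergeTwoPtr xs ((c, y) :: ys) = y :: mergeTwoPtr xs ys := by
  cases xs with
  | nil => rw [merge_nil_left, merge_nil_left, List.map_cons]
  | cons p xs =>
    obtain ⟨i, x⟩ := p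
    have hi : c < i := h (i, x) (List.mem_cons_self)
    rw [mergeTwoPtr, if_neg (by omega)]

lemma merge_DD_II (s d : List Char) (c : Int) :
    mergeTwoPtr (DD s d c) (II s d c) = E s d := by
  induction s generalizing d c with
  | nil =>
    have hDD : DD [] d c = [] := by cases d <;> rfl
    rw [hDD, merge_nil_left, II_nil_map]
    simp [E, zipOps, goDel]
  | cons a s ih =>
    cases d with
    | nil =>
      have hII : II (a :: s) [] c = [] := rfl
      rw [hII, merge_nil_right, DD_nil_map]
      have hz : zipOps (a :: s) [] = [] := rfl
      simp [E, hz, goIns]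
    | cons b d =>
      have hE : E (a :: s) (b :: d) =
          (if ¬ (a == b) then [delStr a (-((s.length : Int) + 1)), insStr b (-((d.length : Int) + 1))] else [])
            ++ E s d := by
        simp only [E, zipOps, List.length_cons, List.drop_succ_cons, List.append_assoc]
      by_cases hab : a = b
      · simp only [DD, II, hab, if_pos, List.nil_append] at *
        rw [hE]
        simp only [beq_self_eq_true, not_true_eq_false, if_false, List.nil_append]
        exact ih d (c + 1)
      · simp only [DD, II, hab, if_false, List.singleton_append]
        rw [mergeTwoPtr, if_pos (le_refl c)]
        rw [merge_skip c _ (DD s d (c + 1)) (II s d (c + 1))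
          (fun x hx => by have := DD_ge s d (c + 1) x hx; omega)]
        rw [hE, if_pos (by simpa using hab), ih d (c + 1)]
        rfl

lemma B_eq_E (source dest : String) :
    generate_operations_for_a_wordpair_alt source dest = E source.toList dest.toList := by
  simp only [generate_operations_for_a_wordpair_alt]
  have hdels : (PySem.List.enumerate source.toList 0).filterMap (fun x =>
      if x.1 ≥ (dest.toList.length : Int) ∨ x.2 ≠ PySem.List.pyGetD dest.toList x.1 ' ' then
        some (x.1, "delete_" ++ String.mk [x.2] ++ "_" ++ PySem.Int.toStr (x.1 - (source.toList.length : Int))) else none)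
      = DD source.toList dest.toList 0 := by
    rw [PySem.List.enumerate_eq_map_pyRange source.toList ' ', PySem.List.pyRange_one,
      List.map_map, List.filterMap_map]
    rw [← dels_eq source.toList dest.toList 0]
    have hlen : (PySem.List.len source.toList - 0).toNat = source.toList.length := by
      simp [PySem.List.len]
    rw [hlen]
    apply pv_filterMap_congr; intro k hk
    simp only [Function.comp, zero_add, PySem.List.pyGetD_natCast, ge_iff_le, Nat.cast_le,
      delStr]
  have hinss : (PySem.List.enumerate dest.toList 0).filterMap (fun x =>
      if x.1 ≥ (source.toList.length : Int) ∨ x.2 ≠ PySem.List.pyGetD source.toList x.1 ' ' then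
        some (x.1, "insert_" ++ String.mk [x.2] ++ "_" ++ PySem.Int.toStr (x.1 - (dest.toList.length : Int))) else none)
      = II source.toList dest.toList 0 := by
    rw [PySem.List.enumerate_eq_map_pyRange dest.toList ' ', PySem.List.pyRange_one,
      List.map_map, List.filterMap_map]
    rw [← inss_eq source.toList dest.toList 0]
    have hlen : (PySem.List.len dest.toList - 0).toNat = dest.toList.length := by
      simp [PySem.List.len]
    rw [hlen]
    apply pv_filterMap_congr; intro k hk
    simp only [Function.comp, zero_add, PySem.List.pyGetD_natCast, ge_iff_le, Nat.cast_le,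
      insStr]
  rw [hdels, hinss, merge_DD_II]

-- ===== VERDICT (by name: the statement is the Claim_ definition above) =====
theorem generate_operations_for_a_wordpair_spec : Claim_equal_generate_operations_for_a_wordpair := by
  intro source dest _
  show _ = _
  rw [A_eq_flat, flat_fA, B_eq_E]
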